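-- pv_equiv track=rewrite | github.com/ansh1113/ovla | ovla/core/semantic_extractor.py | _classify_joint_component
-- ===== SOURCE A (Python) =====
-- def _classify_joint_component(joint_name: str) -> str:
--     """Heuristic component classification"""
--     name_lower = joint_name.lower()
--
--     if any(x in name_lower for x in ['left', '_l_', 'fl_']):
--         if any(x in name_lower for x in ['arm', 'shoulder', 'elbow', 'wrist']):
--             return 'left_arm'
--         elif any(x in name_lower for x in ['leg', 'hip', 'knee', 'ankle']):
--             return 'left_leg'
--
--     if any(x in name_lower for x in ['right', '_r_', 'fr_']):
--         if any(x in name_lower for x in ['arm', 'shoulder', 'elbow', 'wrist']):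
--             return 'right_arm'
--         elif any(x in name_lower for x in ['leg', 'hip', 'knee', 'ankle']):
--             return 'right_leg'
--
--     if any(x in name_lower for x in ['rear', 'rr_', 'rl_', 'back']):
--         return 'rear_leg'
--
--     if any(x in name_lower for x in ['torso', 'waist', 'spine', 'base', 'pelvis']):
--         return 'torso'
--
--     return 'other'
-- ===== SOURCE B (Python) =====
-- # Flattened marker->label pairs; first substring hit wins.
-- _SIDE_MARKERS = [('left', 'left'), ('_l_', 'left'), ('fl_', 'left'),
--                  ('right', 'right'), ('_r_', 'right'), ('fr_', 'right')]
-- _PART_MARKERS = [('arm', 'arm'), ('shoulder', 'arm'), ('elbow', 'arm'), ('wrist', 'arm'),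
--                  ('leg', 'leg'), ('hip', 'leg'), ('knee', 'leg'), ('ankle', 'leg')]
-- _TAIL_MARKERS = [('rear', 'rear_leg'), ('rr_', 'rear_leg'), ('rl_', 'rear_leg'), ('back', 'rear_leg'),
--                  ('torso', 'torso'), ('waist', 'torso'), ('spine', 'torso'),
--                  ('base', 'torso'), ('pelvis', 'torso')]
--
--
-- def _first_label(pairs, text):
--     return next((label for marker, label in pairs if marker in text), None)
--
--
-- def _classify_joint_component(joint_name: str) -> str:
--     name_lower = joint_name.lower()
--     side = _first_label(_SIDE_MARKERS, name_lower)
--     part = _first_label(_PART_MARKERS, name_lower)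
--     if side is not None and part is not None:
--         return f'{side}_{part}'
--     tail = _first_label(_TAIL_MARKERS, name_lower)
--     return tail if tail is not None else 'other'
-- ===== Notes on version B (the rewrite author's own statement) =====
-- stated objective: simpler
-- what changed: Instead of A's nested if/any chain that re-tests the part markers once per side, B extracts features unconditionally: a single generic first-match scan over flattened marker->label pair lists yields side, part and tail labels, which one final combination step turns into the result.
import Mathlib
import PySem

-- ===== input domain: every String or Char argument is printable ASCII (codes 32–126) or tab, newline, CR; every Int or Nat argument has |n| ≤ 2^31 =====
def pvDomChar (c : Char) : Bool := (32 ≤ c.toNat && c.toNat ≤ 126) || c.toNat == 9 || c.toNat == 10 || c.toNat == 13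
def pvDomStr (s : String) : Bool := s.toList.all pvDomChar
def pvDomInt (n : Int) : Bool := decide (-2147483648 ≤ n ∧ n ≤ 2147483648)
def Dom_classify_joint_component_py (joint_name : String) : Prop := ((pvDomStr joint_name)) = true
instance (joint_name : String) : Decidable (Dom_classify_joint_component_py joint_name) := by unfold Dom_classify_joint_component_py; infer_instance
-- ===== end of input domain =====

-- B replaces A's nested if/any chain (which tests the part markers once per side) by
-- unconditional feature extraction: one generic first-match scan over flattened
-- marker→label pairs gives side, part and tail, combined at the end (objective: simpler).

-- ===== PORT A =====
-- Literal transliteration: nested ifs; a side match without a part match falls through.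
def classify_joint_component_py (joint_name : String) : String :=
  let nl := PySem.Str.lower joint_name
  let rest3 :=
    if ["torso", "waist", "spine", "base", "pelvis"].any (fun x => PySem.Str.isIn x nl) then "torso"
    else "other"
  let rest2 :=
    if ["rear", "rr_", "rl_", "back"].any (fun x => PySem.Str.isIn x nl) then "rear_leg"
    else rest3
  let rest1 :=
    if ["right", "_r_", "fr_"].any (fun x => PySem.Str.isIn x nl) then
      if ["arm", "shoulder", "elbow", "wrist"].any (fun x => PySem.Str.isIn x nl) then "right_arm"
      else if ["leg", "hip", "knee", "ankle"].any (fun x => PySem.Str.isIn x nl) then "right_leg"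
      else rest2
    else rest2
  if ["left", "_l_", "fl_"].any (fun x => PySem.Str.isIn x nl) then
    if ["arm", "shoulder", "elbow", "wrist"].any (fun x => PySem.Str.isIn x nl) then "left_arm"
    else if ["leg", "hip", "knee", "ankle"].any (fun x => PySem.Str.isIn x nl) then "left_leg"
    else rest1
  else rest1

-- ===== PORT B =====
def pvSideMarkers : List (String × String) :=
  [("left", "left"), ("_l_", "left"), ("fl_", "left"),
   ("right", "right"), ("_r_", "right"), ("fr_", "right")]

def pvPartMarkers : List (String × String) :=
  [("arm", "arm"), ("shoulder", "arm"), ("elbow", "arm"), ("wrist", "arm"),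
   ("leg", "leg"), ("hip", "leg"), ("knee", "leg"), ("ankle", "leg")]

def pvTailMarkers : List (String × String) :=
  [("rear", "rear_leg"), ("rr_", "rear_leg"), ("rl_", "rear_leg"), ("back", "rear_leg"),
   ("torso", "torso"), ("waist", "torso"), ("spine", "torso"),
   ("base", "torso"), ("pelvis", "torso")]

-- label of the first pair whose marker occurs in text ('next(... , None)')
def pvFirstLabel (pairs : List (String × String)) (text : String) : Option String :=
  match pairs with
  | [] => none
  | (marker, label) :: rest =>
    if PySem.Str.isIn marker text then some label else pvFirstLabel rest text

def classify_joint_component_py_alt (joint_name : String) : String :=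
  let nl := PySem.Str.lower joint_name
  let side := pvFirstLabel pvSideMarkers nl
  let part := pvFirstLabel pvPartMarkers nl
  match side, part with
  | some s, some p => s ++ "_" ++ p
  | _, _ =>
    match pvFirstLabel pvTailMarkers nl with
    | some t => t
    | none => "other"

-- ===== PRECONDITION & SPEC =====
def Spec_classify_joint_component_py (joint_name : String) (out : String) : Prop := out = classify_joint_component_py_alt joint_name
instance (joint_name : String) (out : String) : Decidable (Spec_classify_joint_component_py joint_name out) := by unfold Spec_classify_joint_component_py; infer_instance

-- ===== CLAIM (what is proved, stated in full; the proofs are below) =====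
def Claim_equal_classify_joint_component_py : Prop := ∀ (joint_name : String), Dom_classify_joint_component_py joint_name → Spec_classify_joint_component_py joint_name (classify_joint_component_py joint_name)

-- ===== LEMMAS AND PROOFS =====

theorem pvFirstLabel_side (nl : String) :
    pvFirstLabel pvSideMarkers nl =
      (if ["left", "_l_", "fl_"].any (fun x => PySem.Str.isIn x nl) then some "left"
       else if ["right", "_r_", "fr_"].any (fun x => PySem.Str.isIn x nl) then some "right"
       else none) := by
  simp only [pvFirstLabel, pvSideMarkers, List.any_cons, List.any_nil, Bool.or_false]
  split_ifs <;> simp_all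

theorem pvFirstLabel_part (nl : String) :
    pvFirstLabel pvPartMarkers nl =
      (if ["arm", "shoulder", "elbow", "wrist"].any (fun x => PySem.Str.isIn x nl) then some "arm"
       else if ["leg", "hip", "knee", "ankle"].any (fun x => PySem.Str.isIn x nl) then some "leg"
       else none) := by
  simp only [pvFirstLabel, pvPartMarkers, List.any_cons, List.any_nil, Bool.or_false]
  split_ifs <;> simp_all

theorem pvFirstLabel_tail (nl : String) :
    pvFirstLabel pvTailMarkers nl =
      (if ["rear", "rr_", "rl_", "back"].any (fun x => PySem.Str.isIn x nl) then some "rear_leg"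
       else if ["torso", "waist", "spine", "base", "pelvis"].any (fun x => PySem.Str.isIn x nl) then some "torso"
       else none) := by
  simp only [pvFirstLabel, pvTailMarkers, List.any_cons, List.any_nil, Bool.or_false]
  split_ifs <;> simp_all

-- ===== VERDICT (by name: the statement is the Claim_ definition above) =====
theorem classify_joint_component_py_spec : Claim_equal_classify_joint_component_py := by
  intro jn _
  unfold Spec_classify_joint_component_py
  unfold classify_joint_component_py classify_joint_component_py_alt
  simp only [pvFirstLabel_side, pvFirstLabel_part, pvFirstLabel_tail]
  split_ifs <;> simp_all
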